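-- pv_equiv track=rewrite | github.com/piccolomo/plotext | plotext/_utility.py | set_sizes
-- ===== SOURCE A (Python) =====
-- def set_sizes(sizes, size_max): # given certain widths (or heights) - some of them are None -  it sets them so to respect max value
--     bins = len(sizes)
--     for s in range(bins):
--         size_set = sum([el for el in sizes[0 : s] + sizes[s + 1 : ] if el is not None])
--         available = max(size_max - size_set, 0)
--         to_set = len([el for el in sizes[s : ] if el is None])
--         sizes[s] = available // to_set if sizes[s] is None else sizes[s]
--     return sizes
-- ===== SOURCE B (Python) =====
-- def set_sizes(sizes, size_max):
--     # Single-pass closed-form distribution: divmod once instead of re-scanning per slot.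
--     k = sum(1 for el in sizes if el is None)
--     if k != 0:
--         rem = max(size_max - sum(el for el in sizes if el is not None), 0)
--         q, r = divmod(rem, k)
--         j = 0
--         for i, el in enumerate(sizes):
--             if el is None:
--                 sizes[i] = q if j < k - r else q + 1
--                 j += 1
--     return sizes
-- ===== Notes on version B (the rewrite author's own statement) =====
-- stated objective: faster
-- what changed: Replaces the per-slot re-scan (each iteration re-sums the whole list and re-counts remaining None slots) by one preliminary pass computing the fixed sum and None count, one divmod, and one assignment pass using the closed-form quotient/remainder distribution.
import Mathlib
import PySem

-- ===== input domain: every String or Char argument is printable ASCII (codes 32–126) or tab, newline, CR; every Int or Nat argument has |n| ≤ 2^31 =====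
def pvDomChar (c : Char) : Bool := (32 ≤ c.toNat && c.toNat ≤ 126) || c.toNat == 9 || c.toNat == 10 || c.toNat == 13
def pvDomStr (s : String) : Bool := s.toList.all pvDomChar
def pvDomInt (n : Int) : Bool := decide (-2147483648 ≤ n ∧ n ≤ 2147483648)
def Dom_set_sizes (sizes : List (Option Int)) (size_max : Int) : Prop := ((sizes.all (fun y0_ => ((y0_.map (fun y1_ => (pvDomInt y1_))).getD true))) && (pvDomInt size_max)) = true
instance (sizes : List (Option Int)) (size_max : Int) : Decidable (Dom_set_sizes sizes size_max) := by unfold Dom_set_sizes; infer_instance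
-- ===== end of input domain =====

-- B replaces A's quadratic per-slot re-scan by one fixed-sum/None-count pass, one divmod
-- and one assignment pass (closed-form distribution); A mutates its argument in place,
-- the equivalence proved here is about the RETURN value only.

-- ===== PORT A =====
-- one iteration of A's `for s in range(bins)` loop (the list is the mutable state)
def stepA (size_max : Int) (l : List (Option Int)) (s : Int) : List (Option Int) :=
  let size_set := ((PySem.List.slice l (some 0) (some s) ++ PySem.List.slice l (some (s + 1)) none).filterMap id).sum
  let available := max (size_max - size_set) 0
  let to_set : Int := ((PySem.List.slice l (some s) none).filter (fun el => el.isNone)).length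
  let newval : Option Int :=
    match PySem.List.pyGet? l s with
    | some none => some (PySem.Int.floordiv available to_set)
    | some (some v) => some v
    | none => none        -- unreachable: 0 ≤ s < len l
  l.set s.toNat newval

def set_sizes (sizes : List (Option Int)) (size_max : Int) : List Int :=
  ((PySem.List.pyRange 0 (sizes.length : Int) 1).foldl (stepA size_max) sizes).map (fun o => o.getD 0)
  -- final `.map (·.getD 0)`: type conversion only — after the loop every entry is `some`

-- ===== PORT B =====
-- B's assignment pass: j counts the None slots seen so far
def bAssign (q kr : Int) : List (Option Int) → Int → List Int
  | [], _ => []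
  | some v :: t, j => v :: bAssign q kr t j
  | none :: t, j => (if j < kr then q else q + 1) :: bAssign q kr t (j + 1)

def set_sizes_alt (sizes : List (Option Int)) (size_max : Int) : List Int :=
  let k : Int := ((sizes.filter (fun el => el.isNone)).length : Int)
  if k ≠ 0 then
    let rem := max (size_max - (sizes.filterMap id).sum) 0
    let q := PySem.Int.floordiv rem k
    let r := PySem.Int.mod rem k
    bAssign q (k - r) sizes 0
  else
    sizes.map (fun o => o.getD 0)

-- ===== PRECONDITION & SPEC =====
def Spec_set_sizes (sizes : List (Option Int)) (size_max : Int) (out : List Int) : Prop := out = set_sizes_alt sizes size_max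
instance (sizes : List (Option Int)) (size_max : Int) (out : List Int) : Decidable (Spec_set_sizes sizes size_max out) := by unfold Spec_set_sizes; infer_instance

-- ===== CLAIM (what is proved, stated in full; the proofs are below) =====
def Claim_equal_set_sizes : Prop := ∀ (sizes : List (Option Int)) (size_max : Int), Dom_set_sizes sizes size_max → Spec_set_sizes sizes size_max (set_sizes sizes size_max)

-- ===== LEMMAS AND PROOFS =====

-- sum of the non-None entries / number of None entries
def sumF (l : List (Option Int)) : Int := (l.filterMap id).sum
def cN (l : List (Option Int)) : Int := ((l.filter (fun el => el.isNone)).length : Int)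

-- sequential spec of A: walk the list, each None slot gets (remaining budget) // (None slots left)
def procA : List (Option Int) → Int → List Int
  | [], _ => []
  | some v :: t, m => v :: procA t (m - v)
  | none :: t, m =>
      PySem.Int.floordiv (max (m - sumF t) 0) (1 + cN t)
        :: procA t (m - PySem.Int.floordiv (max (m - sumF t) 0) (1 + cN t))

-- closed-form spec: i-th None slot (counting from the head) gets (R + i) // k
def cA (R k : Int) : List (Option Int) → List Int
  | [] => []
  | some v :: t => v :: cA R k t
  | none :: t => PySem.Int.floordiv R k :: cA (R + 1) k t

theorem cN_nonneg (l : List (Option Int)) : 0 ≤ cN l := by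
  simp [cN]

theorem cN_cons_none (t : List (Option Int)) : cN (none :: t) = 1 + cN t := by
  simp [cN]; omega

theorem cN_cons_some (v : Int) (t : List (Option Int)) : cN (some v :: t) = cN t := by
  simp [cN]

-- the key arithmetic step: (R - R//k + i) // (k-1) = (R + 1 + i) // k
theorem keyStep (R k i : Int) (hR : 0 ≤ R) (hk : 2 ≤ k) (hi : 0 ≤ i) (hik : i ≤ k - 2) :
    PySem.Int.floordiv (R - PySem.Int.floordiv R k + i) (k - 1) = PySem.Int.floordiv (R + 1 + i) k := by
  have hk1 : (0:Int) < k - 1 := by omega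
  have hk0 : (0:Int) < k := by omega
  rw [PySem.Int.floordiv_eq_ediv_of_pos hk1, PySem.Int.floordiv_eq_ediv_of_pos hk0,
      PySem.Int.floordiv_eq_ediv_of_pos hk0]
  set q := R / k with hq
  set r := R % k with hr
  have hrq : k * q + r = R := Int.mul_ediv_add_emod R k
  have hr0 : 0 ≤ r := Int.emod_nonneg R (by omega)
  have hrk : r < k := Int.emod_lt_of_pos R hk0
  have h1 : R - q + i = (r + i) + q * (k - 1) := by rw [← hrq]; ring
  have h2 : R + 1 + i = (r + 1 + i) + q * k := by rw [← hrq]; ring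
  rw [h1, h2, Int.add_mul_ediv_right _ _ (by omega : (k:Int) - 1 ≠ 0),
      Int.add_mul_ediv_right _ _ (by omega : (k:Int) ≠ 0)]
  have hfin : (r + i) / (k - 1) = (r + 1 + i) / k := by
    by_cases hc : r + i < k - 1
    · rw [Int.ediv_eq_zero_of_lt (by omega) hc, Int.ediv_eq_zero_of_lt (by omega) (by omega)]
    · have e1 : r + i = (r + i - (k - 1)) + 1 * (k - 1) := by ring
      have e2 : r + 1 + i = (r + 1 + i - k) + 1 * k := by ring
      rw [e1, Int.add_mul_ediv_right _ _ (by omega : (k:Int) - 1 ≠ 0),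
          Int.ediv_eq_zero_of_lt (by omega) (by omega),
          e2, Int.add_mul_ediv_right _ _ (by omega : (k:Int) ≠ 0),
          Int.ediv_eq_zero_of_lt (by omega) (by omega)]
  omega

-- bridge: shrinking the budget by the first quotient = shifting the numerator
theorem cA_shift (t : List (Option Int)) : ∀ (R k i : Int), 0 ≤ R → 2 ≤ k → 0 ≤ i → i + cN t ≤ k - 1 →
    cA (R - PySem.Int.floordiv R k + i) (k - 1) t = cA (R + 1 + i) k t := by
  induction t with
  | nil => intros; rfl
  | cons h t ih =>
    intro R k i hR hk hi hik
    cases h with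
    | some v =>
      rw [cN_cons_some] at hik
      simp only [cA]
      exact congrArg _ (ih R k i hR hk hi hik)
    | none =>
      rw [cN_cons_none] at hik
      have hcN := cN_nonneg t
      simp only [cA]
      rw [keyStep R k i hR hk hi (by omega)]
      have e1 : R - PySem.Int.floordiv R k + i + 1 = R - PySem.Int.floordiv R k + (i + 1) := by ring
      have e2 : R + 1 + i + 1 = R + 1 + (i + 1) := by ring
      rw [e1, e2, ih R k (i + 1) hR hk (by omega) (by omega)]

theorem floordiv_nonneg_le (R k : Int) (hR : 0 ≤ R) (hk : 0 < k) :
    0 ≤ PySem.Int.floordiv R k ∧ PySem.Int.floordiv R k ≤ R := by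
  rw [PySem.Int.floordiv_eq_ediv_of_pos hk]
  exact ⟨Int.ediv_nonneg hR (by omega), Int.ediv_le_self k hR⟩

-- with no None slots, cA ignores its numeric arguments
theorem cA_congr_no_none (t : List (Option Int)) (h : cN t = 0) :
    ∀ (R k R' k' : Int), cA R k t = cA R' k' t := by
  induction t with
  | nil => intros; rfl
  | cons hd t ih =>
    intro R k R' k'
    cases hd with
    | some v =>
      rw [cN_cons_some] at h
      simp only [cA]
      exact congrArg _ (ih h R k R' k')
    | none =>
      rw [cN_cons_none] at h
      have := cN_nonneg t
      omega

-- sequential spec = closed-form spec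
theorem procA_eq_cA (l : List (Option Int)) : ∀ (m : Int),
    procA l m = cA (max (m - sumF l) 0) (cN l) l := by
  induction l with
  | nil => intro m; rfl
  | cons h t ih =>
    intro m
    cases h with
    | some v =>
      simp only [procA, cA, cN_cons_some]
      rw [ih (m - v)]
      have e : m - sumF (some v :: t) = m - v - sumF t := by simp [sumF]; ring
      rw [e]
    | none =>
      have esum : sumF (none :: t) = sumF t := by simp [sumF]
      simp only [procA, cA, cN_cons_none, esum]
      set R := max (m - sumF t) 0 with hRdef
      have hR : 0 ≤ R := le_max_right _ _
      set x := PySem.Int.floordiv R (1 + cN t) with hx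
      have hk : (0:Int) < 1 + cN t := by have := cN_nonneg t; omega
      have hxb := floordiv_nonneg_le R (1 + cN t) hR hk
      refine congrArg _ ?_
      rw [ih (m - x)]
      have hnext : max (m - x - sumF t) 0 = R - x := by
        by_cases hc : 0 ≤ m - sumF t
        · have : R = m - sumF t := by rw [hRdef]; omega
          omega
        · have hR0 : R = 0 := by rw [hRdef]; omega
          have hx0 : x = 0 := by
            rw [hx, hR0, PySem.Int.floordiv_eq_ediv_of_pos hk]; simp
          omega
      rw [hnext]
      by_cases hk1 : cN t = 0
      · exact cA_congr_no_none t hk1 _ _ _ _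
      · have hk2 : 2 ≤ 1 + cN t := by have := cN_nonneg t; omega
        have key := cA_shift t R (1 + cN t) 0 hR hk2 le_rfl (by omega)
        have e1 : R - PySem.Int.floordiv R (1 + cN t) + 0 = R - x := by rw [hx]; ring
        have e2 : R + 1 + 0 = R + 1 := by ring
        have e3 : (1 : Int) + cN t - 1 = cN t := by ring
        rw [e1, e2, e3] at key
        exact key

-- B's assignment pass computes the closed form
theorem bAssign_eq_cA (t : List (Option Int)) : ∀ (j q r k : Int), 0 < k → 0 ≤ r → r < k →
    0 ≤ j → j + cN t ≤ k →
    bAssign q (k - r) t j = cA (q * k + r + j) k t := by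
  induction t with
  | nil => intros; rfl
  | cons h t ih =>
    intro j q r k hk hr0 hrk hj hcnt
    cases h with
    | some v =>
      rw [cN_cons_some] at hcnt
      simp only [bAssign, cA]
      exact congrArg _ (ih j q r k hk hr0 hrk hj hcnt)
    | none =>
      rw [cN_cons_none] at hcnt
      have hcN := cN_nonneg t
      simp only [bAssign, cA]
      have hhead : (if j < k - r then q else q + 1) = PySem.Int.floordiv (q * k + r + j) k := by
        rw [PySem.Int.floordiv_eq_ediv_of_pos hk]
        have e : q * k + r + j = (r + j) + q * k := by ring
        rw [e, Int.add_mul_ediv_right _ _ (by omega : k ≠ 0)]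
        by_cases hc : j < k - r
        · rw [Int.ediv_eq_zero_of_lt (by omega) (by omega)]
          simp [hc]
        · have e2 : r + j = (r + j - k) + 1 * k := by ring
          rw [e2, Int.add_mul_ediv_right _ _ (by omega : k ≠ 0),
              Int.ediv_eq_zero_of_lt (by omega) (by omega)]
          simp [hc]
          omega
      have e3 : q * k + r + j + 1 = q * k + r + (j + 1) := by ring
      rw [hhead, e3, ih (j + 1) q r k hk hr0 hrk (by omega) (by omega)]

-- with no None slots the sequential spec copies the list
theorem procA_no_none (l : List (Option Int)) (h : cN l = 0) :
    ∀ m, procA l m = l.map (fun o => o.getD 0) := by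
  induction l with
  | nil => intro m; rfl
  | cons hd t ih =>
    intro m
    cases hd with
    | some v =>
      rw [cN_cons_some] at h
      simp only [procA, List.map]
      exact congrArg _ (ih h _)
    | none =>
      rw [cN_cons_none] at h
      have := cN_nonneg t
      omega

-- ===== A's loop equals the sequential spec =====

theorem stepA_prefix (m : Int) (P : List Int) (h : Option Int) (t : List (Option Int)) :
    stepA m (P.map some ++ h :: t) ((P.length : Nat) : Int)
      = P.map some ++
        (match h with
         | none => some (PySem.Int.floordiv (max (m - (P.sum + sumF t)) 0) (cN (h :: t)))
         | some v => some v) :: t := by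
  have hlen : (P.map some).length = P.length := by simp
  have hslice1 : PySem.List.slice (P.map some ++ h :: t) (some 0) (some ((P.length : Nat) : Int))
      = P.map some := by
    rw [PySem.List.slice_zero_start, PySem.List.slice_to_natCast]
    rw [← hlen, List.take_left]
  have hslice2 : PySem.List.slice (P.map some ++ h :: t) (some (((P.length : Nat) : Int) + 1)) none
      = t := by
    have e : ((P.length : Nat) : Int) + 1 = ((P.length + 1 : Nat) : Int) := by push_cast; ring
    rw [e, PySem.List.slice_from_natCast, List.drop_append]
    simp [hlen]
  have hslice3 : PySem.List.slice (P.map some ++ h :: t) (some ((P.length : Nat) : Int)) none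
      = h :: t := by
    rw [PySem.List.slice_from_natCast, List.drop_append]
    simp [hlen]
  have hget : PySem.List.pyGet? (P.map some ++ h :: t) ((P.length : Nat) : Int) = some h := by
    have := PySem.List.pyGet?_append_length (P.map some) t h
    rw [hlen] at this
    exact this
  have hsum : ∀ v : Option Int, ((P.map some ++ t).filterMap id).sum = P.sum + sumF t := by
    intro _; simp [sumF]
  have hset : ∀ v : Option Int, (P.map some ++ h :: t).set ((P.length : Nat) : Int).toNat v
      = P.map some ++ v :: t := by
    intro v
    have e : ((P.length : Nat) : Int).toNat = (P.map some).length := by simp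
    rw [e, List.set_append_right _ _ le_rfl]
    simp
  simp only [stepA]
  rw [hslice1, hslice2, hslice3, hget]
  cases h with
  | none =>
    rw [hset]
    rw [hsum none]
    rfl
  | some v =>
    rw [hset]

theorem loopA (t : List (Option Int)) : ∀ (P : List Int) (m : Int),
    (PySem.List.pyRange ((P.length : Nat) : Int) (((P.length : Nat) : Int) + ((t.length : Nat) : Int)) 1).foldl
        (stepA m) (P.map some ++ t)
      = P.map some ++ (procA t (m - P.sum)).map some := by
  induction t with
  | nil =>
    intro P m
    rw [PySem.List.pyRange_one_eq_nil (by simp)]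
    simp [procA]
  | cons h t ih =>
    intro P m
    rw [PySem.List.pyRange_one_cons (by push_cast [List.length_cons]; omega)]
    rw [List.foldl_cons, stepA_prefix m P h t]
    simp only [List.length_cons]
    rw [show ((P.length : Nat) : Int) + ((t.length + 1 : Nat) : Int)
          = ((P.length : Nat) : Int) + 1 + ((t.length : Nat) : Int) from by push_cast; ring]
    cases h with
    | some v =>
      have key := ih (P ++ [v]) m
      have hlen : (((P ++ [v]).length : Nat) : Int) = ((P.length : Nat) : Int) + 1 := by
        simp only [List.length_append, List.length_cons, List.length_nil]
        push_cast
        omega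
      rw [hlen] at key
      have hmap : (P ++ [v]).map some = P.map some ++ [some v] := by simp
      rw [hmap] at key
      simp only [List.append_assoc, List.singleton_append] at key
      rw [key]
      have hsum2 : m - (P ++ [v]).sum = m - P.sum - v := by
        simp only [List.sum_append, List.sum_cons, List.sum_nil]
        omega
      rw [hsum2]
      simp [procA]
    | none =>
      set x := PySem.Int.floordiv (max (m - (P.sum + sumF t)) 0) (cN (none :: t)) with hx
      have key := ih (P ++ [x]) m
      have hlen : (((P ++ [x]).length : Nat) : Int) = ((P.length : Nat) : Int) + 1 := by
        simp only [List.length_append, List.length_cons, List.length_nil]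
        push_cast
        omega
      rw [hlen] at key
      have hmap : (P ++ [x]).map some = P.map some ++ [some x] := by simp
      rw [hmap] at key
      simp only [List.append_assoc, List.singleton_append] at key
      rw [key]
      have hsum2 : m - (P ++ [x]).sum = m - P.sum - x := by
        simp only [List.sum_append, List.sum_cons, List.sum_nil]
        omega
      rw [hsum2]
      have hproc : procA (none :: t) (m - P.sum) = x :: procA t (m - P.sum - x) := by
        simp only [procA]
        have hx' : x = PySem.Int.floordiv (max (m - P.sum - sumF t) 0) (1 + cN t) := by
          rw [hx, cN_cons_none]
          have e : m - (P.sum + sumF t) = m - P.sum - sumF t := by ring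
          rw [e]
        rw [← hx']
      rw [hproc]
      simp

theorem set_sizes_eq_procA (sizes : List (Option Int)) (m : Int) :
    set_sizes sizes m = procA sizes m := by
  unfold set_sizes
  have key := loopA sizes [] m
  simp at key
  rw [key]
  simp

theorem mod_bounds (R k : Int) (hk : 0 < k) : 0 ≤ PySem.Int.mod R k ∧ PySem.Int.mod R k < k := by
  rw [PySem.Int.mod_eq_emod_of_pos hk]
  exact ⟨Int.emod_nonneg R (by omega), Int.emod_lt_of_pos R hk⟩

theorem set_sizes_alt_eq_procA (sizes : List (Option Int)) (m : Int) :
    set_sizes_alt sizes m = procA sizes m := by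
  simp only [set_sizes_alt]
  by_cases hk : ((sizes.filter (fun el => el.isNone)).length : Int) = 0
  · rw [if_neg (by omega)]
    exact (procA_no_none sizes hk m).symm
  · have hkpos : 0 < ((sizes.filter (fun el => el.isNone)).length : Int) :=
      lt_of_le_of_ne (Int.natCast_nonneg _) (Ne.symm hk)
    rw [if_pos hk]
    set R := max (m - (sizes.filterMap id).sum) 0 with hR
    set k : Int := ((sizes.filter (fun el => el.isNone)).length : Int) with hkdef
    have hmod := mod_bounds R k hkpos
    have hdm : PySem.Int.floordiv R k * k + PySem.Int.mod R k = R := PySem.Int.floordiv_mul_add_mod R k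
    have key := bAssign_eq_cA sizes 0 (PySem.Int.floordiv R k) (PySem.Int.mod R k) k
      hkpos hmod.1 hmod.2 le_rfl (by rw [show cN sizes = k from rfl]; omega)
    rw [key]
    rw [procA_eq_cA sizes m]
    have e : PySem.Int.floordiv R k * k + PySem.Int.mod R k + 0 = R := by omega
    rw [e]
    rw [show cN sizes = k from rfl, show max (m - sumF sizes) 0 = R from rfl]

-- ===== VERDICT (by name: the statement is the Claim_ definition above) =====
theorem set_sizes_spec : Claim_equal_set_sizes := by
  intro sizes size_max _
  unfold Spec_set_sizes
  rw [set_sizes_eq_procA, set_sizes_alt_eq_procA]
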